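-- pv_equiv track=rewrite | github.com/snyke7/aoc2023 | aoc2015/day08.py | make_nice
-- ===== SOURCE A (Python) =====
-- def make_nice(the_str: str) -> str:
--     result = ''
--     is_escaping = False
--     is_hex = False
--     hex_val = None
--     for i in range(1, len(the_str) - 1):
--         if is_escaping:
--             if the_str[i] == '\\':
--                 result += '\\'
--             elif the_str[i] == r'"':
--                 result += r'"'
--             elif the_str[i] == 'x':
--                 is_hex = True
--             is_escaping = False
--         elif is_hex:
--             if hex_val is None:
--                 hex_val = the_str[i]
--             else:
--                 result += chr(int(hex_val + the_str[i], 16))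
--                 hex_val = None
--                 is_hex = False
--         elif the_str[i] != '\\':
--             result += the_str[i]
--         else:
--             is_escaping = True
--     return result
-- ===== SOURCE B (Python) =====
-- def make_nice(the_str: str) -> str:
--     inner = the_str[1:-1]
--     n = len(inner)
--     out = []
--     i = 0
--     while i < n:
--         c = inner[i]
--         if c != '\\':
--             out.append(c)
--             i += 1
--         elif i + 1 >= n:
--             # lone trailing backslash: emits nothing
--             i += 1
--         else:
--             e = inner[i + 1]
--             if e == 'x':
--                 if i + 4 <= n:
--                     out.append(chr(int(inner[i + 2:i + 4], 16)))
--                 i += 4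
--             else:
--                 if e == '\\' or e == '"':
--                     out.append(e)
--                 i += 2
--     return ''.join(out)
-- ===== Notes on version B (the rewrite author's own statement) =====
-- stated objective: simpler
-- what changed: Replaces A's character-by-character state machine (is_escaping/is_hex/hex_val flags carried across iterations) by a stateless index-advancing lookahead loop over the quote-stripped slice that consumes each escape sequence in one step.
import Mathlib
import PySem

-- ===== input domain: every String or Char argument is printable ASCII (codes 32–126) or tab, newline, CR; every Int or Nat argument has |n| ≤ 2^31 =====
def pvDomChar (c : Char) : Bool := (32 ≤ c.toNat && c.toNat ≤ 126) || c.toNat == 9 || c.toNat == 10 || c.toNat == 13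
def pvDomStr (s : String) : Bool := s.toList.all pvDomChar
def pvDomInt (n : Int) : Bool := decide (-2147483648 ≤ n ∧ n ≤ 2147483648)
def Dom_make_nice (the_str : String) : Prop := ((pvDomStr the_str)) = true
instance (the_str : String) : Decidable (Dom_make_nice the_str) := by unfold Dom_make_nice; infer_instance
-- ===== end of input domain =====

-- B replaces A's three pieces of carried escape state (is_escaping/is_hex/hex_val) by a single
-- lookahead pass with multi-character advances (objective: simpler). Not measured faster.

-- Shared model of the Python builtins `int(s, 16)` for the two-character string a+b
-- (exact on the ASCII/tab/newline/CR domain: optional surrounding whitespace or a sign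
-- around a single digit, or two hex digits; none = ValueError).
def pvHexDigit? (c : Char) : Option Int :=
  if '0' ≤ c ∧ c ≤ '9' then some ((c.toNat : Int) - 48)
  else if 'a' ≤ c ∧ c ≤ 'f' then some ((c.toNat : Int) - 87)
  else if 'A' ≤ c ∧ c ≤ 'F' then some ((c.toNat : Int) - 55)
  else none

def pvIsWs (c : Char) : Bool := c = ' ' || c = '\t' || c = '\n' || c = '\r'

def pvInt16Two? (a b : Char) : Option Int :=
  match pvHexDigit? a, pvHexDigit? b with
  | some ha, some hb => some (16 * ha + hb)
  | some ha, none => if pvIsWs b then some ha else none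
  | none, some hb =>
      if pvIsWs a then some hb
      else if a = '+' then some hb
      else if a = '-' then some (-hb)
      else none
  | none, none => none

-- ===== PORT A =====
-- one step of A's for-loop body; state = (result, is_escaping, is_hex, hex_val)
def aStep (st : List Char × Bool × Bool × Option Char) (c : Char) :
    List Char × Bool × Bool × Option Char :=
  match st with
  | (result, is_escaping, is_hex, hex_val) =>
    if is_escaping then
      if c = '\\' then (result ++ ['\\'], false, is_hex, hex_val)
      else if c = '"' then (result ++ ['"'], false, is_hex, hex_val)
      else if c = 'x' then (result, false, true, hex_val)
      else (result, false, is_hex, hex_val)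
    else if is_hex then
      match hex_val with
      | none => (result, is_escaping, is_hex, some c)
      | some a =>
        -- result += chr(int(hex_val + the_str[i], 16)); raises outside Pre_ (then: emit nothing)
        match pvInt16Two? a c with
        | some v => if 0 ≤ v then (result ++ [Char.ofNat v.toNat], is_escaping, false, none)
                    else (result, is_escaping, false, none)
        | none => (result, is_escaping, false, none)
    else if c ≠ '\\' then (result ++ [c], is_escaping, is_hex, hex_val)
    else (result, true, is_hex, hex_val)

def make_nice (the_str : String) : String :=
  -- the loop visits the_str[i] for i in range(1, len(the_str) - 1)
  String.mk (List.foldl aStep ([], false, false, none) ((the_str.toList.drop 1).dropLast)).1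

-- ===== PORT B =====
-- chr(int(inner[i+2:i+4], 16)); int raises outside Pre_ (then: an arbitrary NUL)
def pvChrHex (a b : Char) : Char := Char.ofNat ((pvInt16Two? a b).getD 0).toNat

-- B's while loop over inner with lookahead and multi-character advances
def bDecode : List Char → List Char
  | [] => []
  | '\\' :: 'x' :: a :: b :: rest => pvChrHex a b :: bDecode rest
  | '\\' :: 'x' :: _ => []                     -- truncated \x: past the end, nothing emitted
  | '\\' :: e :: rest => if e = '\\' ∨ e = '"' then e :: bDecode rest else bDecode rest
  | ['\\'] => []                               -- lone trailing backslash
  | c :: rest => c :: bDecode rest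

def make_nice_alt (the_str : String) : String :=
  -- inner = the_str[1:-1]
  String.mk (bDecode ((the_str.toList.drop 1).dropLast))

-- ===== PRECONDITION & SPEC =====
-- Pre_: a SHAPE (grammar) condition on the input string, not a run of either algorithm:
-- every `\x` escape in the inner text that is followed by two further characters carries a
-- pair that the Python builtin int(·,16) accepts with a non-negative value. It computes no
-- output and shares nothing with the ports except pvInt16Two?, the model of the builtin.
-- This is exactly where A returns instead of raising ValueError from int(...) / chr(...).
def goodEsc : List Char → Bool
  | '\\' :: 'x' :: a :: b :: rest =>
      (match pvInt16Two? a b with | some v => decide (0 ≤ v) | none => false) && goodEsc rest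
  | '\\' :: 'x' :: _ => true
  | '\\' :: _ :: rest => goodEsc rest
  | _ :: rest => goodEsc rest
  | [] => true

def Pre_make_nice (the_str : String) : Prop :=
  goodEsc ((the_str.toList.drop 1).dropLast) = true
instance (the_str : String) : Decidable (Pre_make_nice the_str) := by
  unfold Pre_make_nice; infer_instance

def pvWitness_make_nice : String := "\"a\\x41 \\\\ \\\" b\""

def Spec_make_nice (the_str : String) (out : String) : Prop := out = make_nice_alt the_str
instance (the_str : String) (out : String) : Decidable (Spec_make_nice the_str out) := by
  unfold Spec_make_nice; infer_instance

-- ===== CLAIM (what is proved, stated in full; the proofs are below) =====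
def Claim_equal_make_nice : Prop :=
  ∀ (the_str : String), Dom_make_nice the_str → Pre_make_nice the_str →
    Spec_make_nice the_str (make_nice the_str)

-- ===== LEMMAS AND PROOFS =====
lemma foldl_aStep_eq_bDecode (cs : List Char) (acc : List Char) (h : goodEsc cs = true) :
    (List.foldl aStep (acc, false, false, none) cs).1 = acc ++ bDecode cs := by
  induction cs using bDecode.induct generalizing acc with
  | case1 => simp [bDecode]
  | case2 a b rest ih =>
      simp only [goodEsc, Bool.and_eq_true] at h
      obtain ⟨h1, h2⟩ := h
      rcases hp : pvInt16Two? a b with _ | v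
      · rw [hp] at h1; simp at h1
      · rw [hp] at h1
        have hv : 0 ≤ v := by simpa using h1
        simp [List.foldl, aStep, bDecode, hp, hv, pvChrHex, ih _ h2]
  | case3 tail htl =>
      rcases tail with _ | ⟨a, t⟩
      · simp [List.foldl, aStep, bDecode]
      · rcases t with _ | ⟨b, t2⟩
        · simp [List.foldl, aStep, bDecode]
        · exact absurd rfl (fun he => htl a b t2 he)
  | case4 e rest h1 hx hor ih =>
      have h' : goodEsc rest = true := by
        rcases hor with he | he <;> subst he <;> simpa [goodEsc] using h
      rcases hor with he | he <;> subst he <;>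
        simp [List.foldl, aStep, bDecode, ih _ h']
  | case5 e rest h1 hx hnor ih =>
      have hx' : e ≠ 'x' := fun he => hx he
      have he1 : e ≠ '\\' := fun he => hnor (Or.inl he)
      have he2 : e ≠ '"' := fun he => hnor (Or.inr he)
      have h' : goodEsc rest = true := by simpa [goodEsc, hx', he1, he2] using h
      simp [List.foldl, aStep, bDecode, hx', he1, he2, ih _ h']
  | case6 => simp [List.foldl, aStep, bDecode]
  | case7 c rest h1 h2 h3 h4 ih =>
      have hc : c ≠ '\\' := by
        intro hceq
        cases rest with
        | nil => exact h4 hceq rfl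
        | cons y ys => exact h3 y ys hceq rfl
      have h' : goodEsc rest = true := by simpa [goodEsc, hc] using h
      simp [List.foldl, aStep, bDecode, hc, ih _ h']

-- ===== VERDICT (by name: the statement is the Claim_ definition above) =====
theorem make_nice_spec : Claim_equal_make_nice := by
  intro s _ hpre
  unfold Spec_make_nice make_nice make_nice_alt
  rw [foldl_aStep_eq_bDecode _ [] hpre]
  simp
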